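-- pv_equiv track=rewrite | github.com/vllm-project/flash-attention | vllm_flash_attn/utils/tree.py | simple_mask
-- ===== SOURCE A (Python) =====
-- def simple_mask(spec_len, num_seq):
--     mask = []
--     for seq in range(num_seq):
--         pos = -1
--         for s in range(spec_len):
--             mask.append(pos)
--             pos = len(mask)-1
--     return mask
-- ===== SOURCE B (Python) =====
-- def simple_mask(spec_len, num_seq):
--     # closed form: entry for (seq, s) is -1 at s == 0, else its own global index minus 1
--     return [-1 if s == 0 else seq * spec_len + s - 1
--             for seq in range(num_seq) for s in range(spec_len)]
-- ===== Notes on version B (the rewrite author's own statement) =====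
-- stated objective: simpler
-- what changed: Replaced the running pos/len(mask)-1 accumulator threaded through nested appends by a closed-form comprehension computing each entry directly from (seq, s).
import Mathlib
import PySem

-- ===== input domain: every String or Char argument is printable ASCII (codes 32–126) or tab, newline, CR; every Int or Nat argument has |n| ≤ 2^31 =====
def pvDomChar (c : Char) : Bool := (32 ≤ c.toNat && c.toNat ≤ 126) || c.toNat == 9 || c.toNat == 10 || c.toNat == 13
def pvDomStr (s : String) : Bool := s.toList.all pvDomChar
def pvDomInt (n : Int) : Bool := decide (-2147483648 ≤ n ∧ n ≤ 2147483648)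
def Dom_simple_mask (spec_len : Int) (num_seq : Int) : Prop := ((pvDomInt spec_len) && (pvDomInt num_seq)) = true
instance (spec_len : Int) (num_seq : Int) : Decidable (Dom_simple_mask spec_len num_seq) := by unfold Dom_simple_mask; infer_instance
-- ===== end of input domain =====

-- B replaces A's running pos / len(mask)-1 accumulator with a closed-form per-entry formula (objective: simpler).

-- ===== PORT A =====
def simple_mask (spec_len : Int) (num_seq : Int) : List Int :=
  (PySem.List.pyRange 0 num_seq 1).foldl (fun mask _seq =>
    ((PySem.List.pyRange 0 spec_len 1).foldl
      (fun (st : List Int × Int) _s =>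
        (st.1 ++ [st.2], ((st.1 ++ [st.2]).length : Int) - 1))
      (mask, -1)).1) []

-- ===== PORT B =====
def simple_mask_alt (spec_len : Int) (num_seq : Int) : List Int :=
  (PySem.List.pyRange 0 num_seq 1).flatMap (fun seq =>
    (PySem.List.pyRange 0 spec_len 1).map (fun s =>
      if s == 0 then (-1 : Int) else seq * spec_len + s - 1))

-- ===== PRECONDITION & SPEC =====
def Spec_simple_mask (spec_len : Int) (num_seq : Int) (out : List Int) : Prop := out = simple_mask_alt spec_len num_seq
instance (spec_len : Int) (num_seq : Int) (out : List Int) : Decidable (Spec_simple_mask spec_len num_seq out) := by unfold Spec_simple_mask; infer_instance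

-- ===== CLAIM (what is proved, stated in full; the proofs are below) =====
def Claim_equal_simple_mask : Prop := ∀ (spec_len : Int) (num_seq : Int), Dom_simple_mask spec_len num_seq → Spec_simple_mask spec_len num_seq (simple_mask spec_len num_seq)

-- ===== LEMMAS AND PROOFS =====

-- A's inner loop over a nonempty list: appends p, then consecutive indices starting at mask.length.
lemma inner_fold (x : Int) (xs : List Int) (mask : List Int) (p : Int) :
    (x :: xs).foldl (fun (st : List Int × Int) _s =>
        (st.1 ++ [st.2], ((st.1 ++ [st.2]).length : Int) - 1)) (mask, p)
    = (mask ++ p :: (List.range xs.length).map (fun (j : Nat) => (mask.length : Int) + (j : Int)),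
       (mask.length : Int) + xs.length) := by
  induction xs generalizing mask p x with
  | nil => simp
  | cons y ys ih =>
      rw [List.foldl_cons, ih]
      refine Prod.ext ?_ ?_
      · simp [List.range_succ_eq_map]
        intro a _
        ring
      · simp; ring

-- with an empty inner range both programs produce [] for every num_seq
lemma nil_case (spec_len num_seq : Int) (h : spec_len ≤ 0) :
    simple_mask spec_len num_seq = [] ∧ simple_mask_alt spec_len num_seq = [] := by
  have hnil : PySem.List.pyRange 0 spec_len 1 = [] := PySem.List.pyRange_one_eq_nil h
  constructor
  · rw [simple_mask, hnil]
    induction PySem.List.pyRange 0 num_seq 1 with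
    | nil => rfl
    | cons a l ih => simpa using ih
  · simp [simple_mask_alt, hnil]

-- peeling one outer iteration, both sides
lemma a_succ (spec_len : Int) (n : Nat) :
    simple_mask spec_len ((n : Int) + 1)
      = ((PySem.List.pyRange 0 spec_len 1).foldl
          (fun (st : List Int × Int) _s =>
            (st.1 ++ [st.2], ((st.1 ++ [st.2]).length : Int) - 1))
          (simple_mask spec_len n, -1)).1 := by
  unfold simple_mask
  rw [PySem.List.pyRange_one_succ_right (by positivity : (0:Int) ≤ (n:Int)),
      List.foldl_append, List.foldl_cons, List.foldl_nil]

lemma alt_succ (spec_len : Int) (n : Nat) :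
    simple_mask_alt spec_len ((n : Int) + 1)
      = simple_mask_alt spec_len n ++ (PySem.List.pyRange 0 spec_len 1).map
          (fun s => if s == 0 then (-1 : Int) else (n : Int) * spec_len + s - 1) := by
  unfold simple_mask_alt
  rw [PySem.List.pyRange_one_succ_right (by positivity : (0:Int) ≤ (n:Int)),
      List.flatMap_append]
  simp

theorem simple_mask_eq_alt_nat (spec_len : Int) (hs : 0 < spec_len) (n : Nat) :
    simple_mask spec_len n = simple_mask_alt spec_len n ∧
    ((simple_mask_alt spec_len n).length : Int) = n * spec_len := by
  induction n with
  | zero =>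
      simp [simple_mask, simple_mask_alt, PySem.List.pyRange_one_eq_nil (le_refl (0:Int))]
  | succ n ih =>
      obtain ⟨hA, hL⟩ := ih
      have hn : ((n + 1 : Nat) : Int) = (n : Int) + 1 := by push_cast; ring
      have hcons : PySem.List.pyRange 0 spec_len 1
          = 0 :: PySem.List.pyRange 1 spec_len 1 := PySem.List.pyRange_one_cons hs
      have hlen1 : (PySem.List.pyRange 1 spec_len 1).length = (spec_len - 1).toNat :=
        PySem.List.length_pyRange_one 1 spec_len
      have htail : (PySem.List.pyRange 1 spec_len 1).map
            (fun s => if s == 0 then (-1 : Int) else (n : Int) * spec_len + s - 1)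
          = (List.range (spec_len - 1).toNat).map
              (fun (j : Nat) => (n : Int) * spec_len + (j : Int)) := by
        apply List.ext_getElem
        · simp [hlen1]
        · intro k h1 h2
          have hk : k < (spec_len - 1).toNat := by simpa [hlen1] using h1
          simp only [List.getElem_map, PySem.List.getElem_pyRange_one, List.getElem_range]
          have : ¬ ((1 : Int) + k = 0) := by positivity
          simp [this]
          ring
      constructor
      · rw [hn, a_succ, alt_succ, hA, hcons, inner_fold]
        dsimp only
        rw [hlen1, hL, List.map_cons, htail]
        simp
      · rw [hn, alt_succ, List.length_append, List.length_map]
        rw [PySem.List.length_pyRange_one 0 spec_len]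
        push_cast [Int.toNat_of_nonneg (by omega : (0:Int) ≤ spec_len - 0)]
        rw [hL]; ring

-- ===== VERDICT (by name: the statement is the Claim_ definition above) =====
theorem simple_mask_spec : Claim_equal_simple_mask := by
  intro spec_len num_seq _
  unfold Spec_simple_mask
  rcases le_or_gt spec_len 0 with hs | hs
  · obtain ⟨h1, h2⟩ := nil_case spec_len num_seq hs
    rw [h1, h2]
  · rcases le_or_gt num_seq 0 with hn | hn
    · have hnil : PySem.List.pyRange 0 num_seq 1 = [] := PySem.List.pyRange_one_eq_nil hn
      simp [simple_mask, simple_mask_alt, hnil]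
    · have : num_seq = ((num_seq.toNat : Nat) : Int) := by omega
      rw [this]
      exact (simple_mask_eq_alt_nat spec_len hs num_seq.toNat).1
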